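-- pv_equiv track=rewrite | github.com/734563000/20 | day9/core/main.py | handle_parse
-- ===== SOURCE A (Python) =====
-- def handle_parse(cmd_l,cmd_dic):
--     # 讲用户输入的数据转换成列表后填充到字典中
--     tag=False
--     for item in cmd_l:
--         if item in cmd_dic:
--             tag=True
--             key=item
--         if tag and item not in cmd_dic:
--             cmd_dic[key].append(item)
--     return cmd_dic
-- ===== SOURCE B (Python) =====
-- def handle_parse(cmd_l, cmd_dic):
--     # Segment view: skip items before the first key, then for each key position
--     # take the whole run of non-key items after it and extend its bucket once.
--     n = len(cmd_l)
--     i = 0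
--     while i < n and cmd_l[i] not in cmd_dic:
--         i += 1
--     while i < n:
--         key = cmd_l[i]
--         j = i + 1
--         while j < n and cmd_l[j] not in cmd_dic:
--             j += 1
--         cmd_dic[key].extend(cmd_l[i + 1:j])
--         i = j
--     return cmd_dic
-- ===== Notes on version B (the rewrite author's own statement) =====
-- stated objective: alternative
-- what changed: Replaces A's per-item tag/key flag loop (one membership test and one append per item) by a two-phase segment scan: skip the prefix before the first key, then repeatedly take the whole run of non-key items after each key and extend that key's bucket once with the slice.
import Mathlib
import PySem

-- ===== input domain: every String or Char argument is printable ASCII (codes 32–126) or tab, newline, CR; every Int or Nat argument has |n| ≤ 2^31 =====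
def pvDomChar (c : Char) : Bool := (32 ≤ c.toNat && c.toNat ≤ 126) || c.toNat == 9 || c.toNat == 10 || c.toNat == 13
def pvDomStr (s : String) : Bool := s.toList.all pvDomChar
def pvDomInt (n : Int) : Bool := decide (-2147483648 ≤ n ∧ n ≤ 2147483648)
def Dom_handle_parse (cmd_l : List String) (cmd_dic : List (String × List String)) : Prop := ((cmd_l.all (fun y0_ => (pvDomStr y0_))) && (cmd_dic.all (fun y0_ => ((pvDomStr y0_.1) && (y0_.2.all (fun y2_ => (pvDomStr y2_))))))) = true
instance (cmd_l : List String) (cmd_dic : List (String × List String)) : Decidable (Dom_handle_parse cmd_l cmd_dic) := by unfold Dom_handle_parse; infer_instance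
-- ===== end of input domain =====

-- B replaces A's per-item tag/key flag loop by a two-phase segment scan (skip prefix to the
-- first key, then extend each key's bucket once with the whole run of non-key items after it);
-- equivalence is about the return value: both Pythons mutate cmd_dic's lists identically in place.


-- ===== PORT A =====
-- helper: `item in cmd_dic` (Python dict membership = key membership)
def pvContains (d : List (String × List String)) (x : String) : Bool :=
  d.any (fun p => p.1 == x)

-- helper: `cmd_dic[key].append(item)` — append to the first entry with that key
def pvAppendVal (k x : String) : List (String × List String) → List (String × List String)
  | [] => []
  | (a, v) :: r => if a == k then (a, v ++ [x]) :: r else (a, v) :: pvAppendVal k x r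

-- A's loop; the pair (tag, key) is encoded as `Option String` (tag = key.isSome:
-- tag is set exactly when key is first assigned and both persist together)
def pvGoA (key : Option String) (d : List (String × List String)) : List String → List (String × List String)
  | [] => d
  | item :: rest =>
    let key' := if pvContains d item then some item else key
    if pvContains d item = false then
      match key' with
      | some k => pvGoA key' (pvAppendVal k item d) rest
      | none => pvGoA key' d rest
    else pvGoA key' d rest

def handle_parse (cmd_l : List String) (cmd_dic : List (String × List String)) : List (String × List String) :=
  pvGoA none cmd_dic cmd_l

-- ===== PORT B =====
-- helper: `cmd_dic[key].extend(seg)` on the first entry with that key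
def pvExtendVal (k : String) (seg : List String) : List (String × List String) → List (String × List String)
  | [] => []
  | (a, v) :: r => if a == k then (a, v ++ seg) :: r else (a, v) :: pvExtendVal k seg r

-- B's first while loop: advance to the first key position
def pvDropPre (d : List (String × List String)) : List String → List String
  | [] => []
  | x :: xs => if pvContains d x then x :: xs else pvDropPre d xs

-- B's inner while loop + slice: the run of non-key items, and the remainder
def pvSplitSeg (d : List (String × List String)) : List String → List String × List String
  | [] => ([], [])
  | x :: xs =>
    if pvContains d x then ([], x :: xs)
    else let p := pvSplitSeg d xs; (x :: p.1, p.2)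

theorem pvSplitSeg_len (d : List (String × List String)) (xs : List String) :
    (pvSplitSeg d xs).2.length ≤ xs.length := by
  induction xs with
  | nil => simp [pvSplitSeg]
  | cons x xs ih =>
    simp only [pvSplitSeg]
    split
    · simp
    · simpa using Nat.le_succ_of_le ih

-- B's outer while loop: one segment per key position
def pvGoB (d : List (String × List String)) : List String → List (String × List String)
  | [] => d
  | x :: xs =>
    let p := pvSplitSeg d xs
    pvGoB (pvExtendVal x p.1 d) p.2
termination_by l => l.length
decreasing_by simpa using Nat.lt_succ_of_le (pvSplitSeg_len d xs)

def handle_parse_alt (cmd_l : List String) (cmd_dic : List (String × List String)) : List (String × List String) :=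
  pvGoB cmd_dic (pvDropPre cmd_dic cmd_l)

-- ===== PRECONDITION & SPEC =====
def Spec_handle_parse (cmd_l : List String) (cmd_dic : List (String × List String)) (out : List (String × List String)) : Prop := out = handle_parse_alt cmd_l cmd_dic
instance (cmd_l : List String) (cmd_dic : List (String × List String)) (out : List (String × List String)) : Decidable (Spec_handle_parse cmd_l cmd_dic out) := by unfold Spec_handle_parse; infer_instance

-- ===== CLAIM (what is proved, stated in full; the proofs are below) =====
def Claim_equal_handle_parse : Prop := ∀ (cmd_l : List String) (cmd_dic : List (String × List String)), Dom_handle_parse cmd_l cmd_dic → Spec_handle_parse cmd_l cmd_dic (handle_parse cmd_l cmd_dic)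

-- ===== LEMMAS AND PROOFS =====


theorem pvContains_appendVal (k x : String) (d : List (String × List String)) (y : String) :
    pvContains (pvAppendVal k x d) y = pvContains d y := by
  induction d with
  | nil => rfl
  | cons p r ih =>
    obtain ⟨a, v⟩ := p
    simp only [pvAppendVal]
    split <;> simp [pvContains, ih] <;> simp_all [pvContains]

theorem pvExtendVal_nil (k : String) (d : List (String × List String)) :
    pvExtendVal k [] d = d := by
  induction d with
  | nil => rfl
  | cons p r ih =>
    obtain ⟨a, v⟩ := p
    simp only [pvExtendVal]
    split <;> simp [ih]

theorem pvExtendVal_appendVal (k x : String) (seg : List String) (d : List (String × List String)) :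
    pvExtendVal k seg (pvAppendVal k x d) = pvExtendVal k (x :: seg) d := by
  induction d with
  | nil => rfl
  | cons p r ih =>
    obtain ⟨a, v⟩ := p
    simp only [pvAppendVal]
    by_cases h : a == k
    · simp [pvExtendVal, h, List.append_assoc]
    · simp [pvExtendVal, h, ih]

theorem pvSplitSeg_appendVal (k x : String) (d : List (String × List String)) (xs : List String) :
    pvSplitSeg (pvAppendVal k x d) xs = pvSplitSeg d xs := by
  induction xs with
  | nil => rfl
  | cons y ys ih => simp [pvSplitSeg, pvContains_appendVal, ih]

theorem pvGoA_some_eq (xs : List String) (k : String) (d : List (String × List String)) :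
    pvGoA (some k) d xs = pvGoB (pvExtendVal k (pvSplitSeg d xs).1 d) (pvSplitSeg d xs).2 := by
  induction xs generalizing k d with
  | nil => simp [pvGoA, pvSplitSeg, pvGoB, pvExtendVal_nil]
  | cons x xs ih =>
    by_cases h : pvContains d x
    · rw [show pvSplitSeg d (x :: xs) = ([], x :: xs) by simp [pvSplitSeg, h]]
      rw [pvExtendVal_nil, pvGoB]
      simp only [pvGoA, h, if_true, Bool.true_eq_false, if_false]
      exact ih x d
    · have hs : pvSplitSeg d (x :: xs)
          = (x :: (pvSplitSeg d xs).1, (pvSplitSeg d xs).2) := by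
        simp [pvSplitSeg, h]
      have h' : pvContains d x = false := by simp [h]
      rw [hs]
      simp only [pvGoA, h', Bool.false_eq_true, if_false, if_true, eq_self_iff_true, reduceIte]
      rw [ih k (pvAppendVal k x d), pvSplitSeg_appendVal, pvExtendVal_appendVal]

theorem pvGoA_none_eq (xs : List String) (d : List (String × List String)) :
    pvGoA none d xs = pvGoB d (pvDropPre d xs) := by
  induction xs with
  | nil => simp [pvGoA, pvDropPre, pvGoB]
  | cons x xs ih =>
    by_cases h : pvContains d x
    · simp only [pvGoA, h, if_true, Bool.true_eq_false, if_false, pvDropPre]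
      rw [pvGoA_some_eq, pvGoB]
    · simpa [pvGoA, h, pvDropPre] using ih

-- ===== VERDICT (by name: the statement is the Claim_ definition above) =====
theorem handle_parse_spec : Claim_equal_handle_parse := by
  intro cmd_l cmd_dic _
  unfold Spec_handle_parse handle_parse handle_parse_alt
  exact pvGoA_none_eq cmd_l cmd_dic
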